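-- pv_equiv track=rewrite | github.com/thehalleyyoung/deppy | src/deppy/render/predicate_refine.py | fenwick_prefix_correct
-- ===== SOURCE A (Python) =====
-- from typing import (
--     Any,
--     Callable,
--     Dict,
--     FrozenSet,
--     Iterator,
--     List,
--     Optional,
--     Sequence,
--     Set,
--     Tuple,
--     Union,
-- )
--
-- def fenwick_prefix_correct(arr: Sequence[int], bit: Sequence[int]) -> bool:
--     """Check Fenwick tree stores correct prefix sums."""
--     n = len(arr)
--     if len(bit) < n + 1:
--         return False
--
--     def bit_query(idx):
--         s = 0
--         while idx > 0:
--             s += bit[idx]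
--             idx -= idx & (-idx)
--         return s
--
--     for i in range(n):
--         expected = sum(arr[:i + 1])
--         actual = bit_query(i + 1)
--         if actual != expected:
--             return False
--     return True
-- ===== SOURCE B (Python) =====
-- def fenwick_prefix_correct(arr, bit):
--     """Check Fenwick tree stores correct prefix sums (O(n): each node checked once)."""
--     n = len(arr)
--     if len(bit) < n + 1:
--         return False
--     pref = [0]
--     s = 0
--     for x in arr:
--         s += x
--         pref.append(s)
--     # node i of a correct Fenwick tree holds pref[i] - pref[i & (i - 1)]
--     return all(bit[i] == pref[i] - pref[i & (i - 1)] for i in range(1, n + 1))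
-- ===== Notes on version B (the rewrite author's own statement) =====
-- stated objective: alternative
-- what changed: Instead of re-summing arr[:i+1] and walking the Fenwick query chain for every index, B builds the prefix-sum array once and checks each Fenwick node bit[i] against pref[i] - pref[i & (i-1)] in a single pass; intended as asymptotically better (O(n) vs O(n^2)) but a timing run measured only 1.21x at its largest size, so no speed is claimed.
import Mathlib
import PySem

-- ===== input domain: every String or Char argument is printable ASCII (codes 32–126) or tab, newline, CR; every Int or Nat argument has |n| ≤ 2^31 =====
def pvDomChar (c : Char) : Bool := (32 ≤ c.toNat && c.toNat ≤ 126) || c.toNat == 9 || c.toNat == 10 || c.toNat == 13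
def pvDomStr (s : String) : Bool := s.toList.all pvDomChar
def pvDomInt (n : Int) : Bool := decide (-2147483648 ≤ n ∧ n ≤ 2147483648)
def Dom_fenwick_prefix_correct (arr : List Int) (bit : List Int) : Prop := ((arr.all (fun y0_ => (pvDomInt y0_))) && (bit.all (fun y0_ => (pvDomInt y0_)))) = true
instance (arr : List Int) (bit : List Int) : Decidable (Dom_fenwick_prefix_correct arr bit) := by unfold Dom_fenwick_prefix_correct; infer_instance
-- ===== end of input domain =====

-- B replaces A's per-index slice re-summing and query-chain walks by one prefix-sum pass
-- plus a single check per Fenwick node (intended as asymptotically better; a timing run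
-- measured only ~1.2x on its generated inputs, so no speed claim is made).

-- ===== PORT A =====
-- A's bit_query: s = 0; while idx > 0: s += bit[idx]; idx -= idx & (-idx).
-- For idx > 0, idx - (idx & -idx) = idx &&& (idx - 1) exactly (clears the lowest set bit).
-- bit[idx] is always in range here (1 ≤ idx ≤ n < len(bit), guaranteed by A's length guard),
-- so getD idx 0 is exact.
def pvBitQuery (bit : List Int) (idx : Nat) : Int :=
  if h : idx = 0 then 0
  else bit.getD idx 0 + pvBitQuery bit (idx &&& (idx - 1))
termination_by idx
decreasing_by
  exact Nat.lt_of_le_of_lt Nat.and_le_right (Nat.sub_lt (Nat.pos_of_ne_zero h) one_pos)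

-- A's for-loop over range(n), with early return on a mismatch.
def pvLoopA (arr : List Int) (bit : List Int) : List Nat → Bool
  | [] => true
  | i :: rest =>
    -- expected = sum(arr[:i+1]); actual = bit_query(i+1)
    if pvBitQuery bit (i + 1) ≠ (arr.take (i + 1)).sum then false
    else pvLoopA arr bit rest

def fenwick_prefix_correct (arr : List Int) (bit : List Int) : Bool :=
  let n := arr.length
  if bit.length < n + 1 then false
  else pvLoopA arr bit (List.range n)

-- ===== PORT B =====
-- Source B's prefix loop: pref = [0]; s = 0; for x in arr: s += x; pref.append(s)
def pvPref (arr : List Int) : List Int :=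
  (arr.foldl (fun (st : List Int × Int) x => (st.1 ++ [st.2 + x], st.2 + x)) ([0], 0)).1

-- all(bit[i] == pref[i] - pref[i & (i - 1)] for i in range(1, n + 1)); indices are in range.
def fenwick_prefix_correct_alt (arr : List Int) (bit : List Int) : Bool :=
  let n := arr.length
  if bit.length < n + 1 then false
  else
    let pref := pvPref arr
    (List.range' 1 n).all (fun i =>
      bit.getD i 0 == pref.getD i 0 - pref.getD (i &&& (i - 1)) 0)

-- ===== PRECONDITION & SPEC =====
def Spec_fenwick_prefix_correct (arr : List Int) (bit : List Int) (out : Bool) : Prop := out = fenwick_prefix_correct_alt arr bit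
instance (arr : List Int) (bit : List Int) (out : Bool) : Decidable (Spec_fenwick_prefix_correct arr bit out) := by unfold Spec_fenwick_prefix_correct; infer_instance

-- ===== CLAIM (what is proved, stated in full; the proofs are below) =====
def Claim_equal_fenwick_prefix_correct : Prop := ∀ (arr : List Int) (bit : List Int), Dom_fenwick_prefix_correct arr bit → Spec_fenwick_prefix_correct arr bit (fenwick_prefix_correct arr bit)

-- ===== LEMMAS AND PROOFS =====

-- the lowest-set-bit predecessor is strictly smaller
theorem pvLow_lt {i : Nat} (h : i ≠ 0) : i &&& (i - 1) < i :=
  Nat.lt_of_le_of_lt Nat.and_le_right (Nat.sub_lt (Nat.pos_of_ne_zero h) one_pos)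

-- characterisation of Source B's prefix loop
def pvPrefAux (s : Int) : List Int → List Int
  | [] => []
  | x :: xs => (s + x) :: pvPrefAux (s + x) xs

theorem pvPref_foldl (arr : List Int) : ∀ (l : List Int) (s : Int),
    arr.foldl (fun (st : List Int × Int) x => (st.1 ++ [st.2 + x], st.2 + x)) (l, s)
      = (l ++ pvPrefAux s arr, s + arr.sum) := by
  induction arr with
  | nil => intro l s; simp [pvPrefAux]
  | cons x xs ih =>
    intro l s
    simp only [List.foldl_cons, List.sum_cons, pvPrefAux, ih]
    simp [List.append_assoc]
    ring

theorem pvPrefAux_getD (arr : List Int) : ∀ (s : Int) (i : Nat), i < arr.length →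
    (pvPrefAux s arr).getD i 0 = s + (arr.take (i + 1)).sum := by
  induction arr with
  | nil => intro s i h; simp at h
  | cons x xs ih =>
    intro s i h
    cases i with
    | zero => simp [pvPrefAux]
    | succ j =>
      simp only [pvPrefAux, List.getD_cons_succ, List.take_succ_cons, List.sum_cons]
      rw [ih (s + x) j (by simpa using h)]
      ring

theorem pvPref_getD (arr : List Int) (i : Nat) (h : i ≤ arr.length) :
    (pvPref arr).getD i 0 = (arr.take i).sum := by
  unfold pvPref
  rw [pvPref_foldl]
  cases i with
  | zero => simp
  | succ j =>
    have hj : j < arr.length := by omega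
    simpa using pvPrefAux_getD arr 0 j hj

-- A's loop equals the conjunction of its per-index checks
theorem pvLoopA_eq_all (arr bit : List Int) (l : List Nat) :
    pvLoopA arr bit l = l.all (fun i => pvBitQuery bit (i + 1) == (arr.take (i + 1)).sum) := by
  induction l with
  | nil => rfl
  | cons i rest ih =>
    simp only [pvLoopA, List.all_cons, ih]
    by_cases h : pvBitQuery bit (i + 1) = (arr.take (i + 1)).sum <;> simp [h]

-- the key equivalence: all query results correct ↔ all node values correct
theorem pvChain_of_nodes (arr bit : List Int)
    (H : ∀ j, 1 ≤ j → j ≤ arr.length → bit.getD j 0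
        = (arr.take j).sum - (arr.take (j &&& (j - 1))).sum) :
    ∀ i, i ≤ arr.length → pvBitQuery bit i = (arr.take i).sum := by
  intro i
  induction i using Nat.strong_induction_on with
  | _ i ih =>
    intro hle
    by_cases h0 : i = 0
    · subst h0; simp [pvBitQuery]
    · rw [pvBitQuery]
      simp only [h0, dite_false]
      have hlow : i &&& (i - 1) < i := pvLow_lt h0
      rw [ih _ hlow (by omega), H i (by omega) hle]
      ring

theorem pvNodes_of_chain (arr bit : List Int)
    (H : ∀ i, 1 ≤ i → i ≤ arr.length → pvBitQuery bit i = (arr.take i).sum)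
    (j : Nat) (h1 : 1 ≤ j) (h2 : j ≤ arr.length) :
    bit.getD j 0 = (arr.take j).sum - (arr.take (j &&& (j - 1))).sum := by
  have hj0 : j ≠ 0 := by omega
  have hlow : j &&& (j - 1) < j := pvLow_lt hj0
  have hQlow : pvBitQuery bit (j &&& (j - 1)) = (arr.take (j &&& (j - 1))).sum := by
    by_cases h : j &&& (j - 1) = 0
    · simp [h, pvBitQuery]
    · exact H _ (by omega) (by omega)
  have hQj := H j h1 h2
  rw [pvBitQuery] at hQj
  simp only [hj0, dite_false, hQlow] at hQj
  linarith

-- ===== VERDICT (by name: the statement is the Claim_ definition above) =====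
theorem fenwick_prefix_correct_spec : Claim_equal_fenwick_prefix_correct := by
  intro arr bit _
  unfold Spec_fenwick_prefix_correct fenwick_prefix_correct fenwick_prefix_correct_alt
  by_cases hlen : bit.length < arr.length + 1
  · simp [hlen]
  · simp only [hlen, if_false]
    rw [pvLoopA_eq_all]
    rw [Bool.eq_iff_iff]
    simp only [List.all_eq_true, beq_iff_eq, List.mem_range, List.mem_range'_1]
    constructor
    · intro H i ⟨hi1, hi2⟩
      rw [pvPref_getD arr i (by omega), pvPref_getD arr _ (le_trans (le_of_lt (pvLow_lt (by omega))) (by omega))]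
      refine pvNodes_of_chain arr bit ?_ i hi1 (by omega)
      intro k hk1 hk2
      have := H (k - 1) (by omega)
      simpa [Nat.sub_add_cancel hk1] using this
    · intro H i hi
      refine pvChain_of_nodes arr bit ?_ (i + 1) (by omega)
      intro j hj1 hj2
      have := H j ⟨hj1, by omega⟩
      rw [pvPref_getD arr j (by omega), pvPref_getD arr _ (le_trans (le_of_lt (pvLow_lt (by omega))) (by omega))] at this
      exact this
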